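-- pv_equiv track=rewrite | github.com/ldemon2333/lanqiaopython | day11/【学长带练】火星旅行brute.py | min_delt
-- ===== SOURCE A (Python) =====
-- def min_delt(P, D):
--     res = []
--
--     n = len(P)
--     P_double, D_double = P * 2, D * 2
--
--     for l in range(n):
--         P_sub = P_double[l: l + n]
--         D_sub = D_double[l: l + n]
--
--         for i in range(1, n):
--             P_sub[i] += P_sub[i - 1]
--             D_sub[i] += D_sub[i - 1]
--
--         delts = [p - d for p, d in zip(P_sub, D_sub)]
--         res.append(min(delts))
--
--     return res
-- ===== SOURCE B (Python) =====
-- def min_delt(P, D):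
--     n = len(P)
--     if n == 0:
--         return []
--     # prefix sums over the first 2n circular differences: T[k] = sum of (Pd[j]-Dd[j], j<k)
--     T = [0]
--     cur = 0
--     for p, d in zip(P + P, D + D):
--         cur += p - d
--         T.append(cur)
--     # suffix minima of the first window block: suf[l] = min(T[l+1..n])
--     suf = [T[n]]
--     cur = T[n]
--     for i in range(n - 1, 0, -1):
--         cur = min(T[i], cur)
--         suf.append(cur)
--     suf.reverse()
--     # rotation l's answer = min over the window T[l+1..l+n], minus T[l]
--     res = [suf[0]]
--     pref = T[n + 1]
--     for l in range(1, n):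
--         res.append(min(suf[l], pref) - T[l])
--         pref = min(pref, T[n + l + 1])
--     return res
-- ===== Notes on version B (the rewrite author's own statement) =====
-- stated objective: faster
-- what changed: Replaces the per-rotation re-slicing and in-place prefix-summing (quadratic) by one prefix-sum pass over the doubled difference array plus a suffix-minimum array and a running prefix minimum, so each rotation's windowed minimum is read off in O(1).
import Mathlib
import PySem

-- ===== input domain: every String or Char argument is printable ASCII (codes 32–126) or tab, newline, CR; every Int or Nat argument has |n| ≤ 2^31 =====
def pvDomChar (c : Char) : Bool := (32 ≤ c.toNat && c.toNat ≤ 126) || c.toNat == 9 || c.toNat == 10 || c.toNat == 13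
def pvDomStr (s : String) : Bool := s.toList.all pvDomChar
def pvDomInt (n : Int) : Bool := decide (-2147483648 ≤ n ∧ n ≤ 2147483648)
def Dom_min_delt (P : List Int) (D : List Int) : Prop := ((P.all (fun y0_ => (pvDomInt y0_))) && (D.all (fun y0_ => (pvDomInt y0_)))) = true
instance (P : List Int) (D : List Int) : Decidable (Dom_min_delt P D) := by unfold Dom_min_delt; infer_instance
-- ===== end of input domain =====

-- B replaces A's per-rotation slicing and re-summing by one prefix-sum pass plus a
-- suffix-minimum array and a running prefix minimum (objective: faster, O(n) vs O(n^2)).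

-- ===== PORT A =====
def min_delt (P : List Int) (D : List Int) : List Int :=
  let n : Int := P.length
  let Pd := PySem.List.pyRepeat P 2
  let Dd := PySem.List.pyRepeat D 2
  (PySem.List.pyRange 0 n 1).foldl (fun res l =>
    let Psub0 := PySem.List.slice Pd (some l) (some (l + n))
    let Dsub0 := PySem.List.slice Dd (some l) (some (l + n))
    let sd := (PySem.List.pyRange 1 n 1).foldl (fun sd i =>
      (PySem.List.pySetD sd.1 i (PySem.List.pyGetD sd.1 i 0 + PySem.List.pyGetD sd.1 (i-1) 0),
       PySem.List.pySetD sd.2 i (PySem.List.pyGetD sd.2 i 0 + PySem.List.pyGetD sd.2 (i-1) 0)))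
      (Psub0, Dsub0)
    let delts := (sd.1.zip sd.2).map (fun pd => pd.1 - pd.2)
    res ++ [(PySem.List.min? delts (fun x => x)).getD 0]) []

-- ===== PORT B =====
def min_delt_alt (P : List Int) (D : List Int) : List Int :=
  let n : Int := P.length
  if n = 0 then []
  else
    let Tc := ((P ++ P).zip (D ++ D)).foldl (fun (sc : List Int × Int) pd =>
        (sc.1 ++ [sc.2 + pd.1 - pd.2], sc.2 + pd.1 - pd.2)) ([0], 0)
    let T := Tc.1
    let Tn := PySem.List.pyGetD T n 0
    let sufc := (PySem.List.pyRange (n - 1) 0 (-1)).foldl (fun (sc : List Int × Int) i =>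
        (sc.1 ++ [min (PySem.List.pyGetD T i 0) sc.2], min (PySem.List.pyGetD T i 0) sc.2))
        ([Tn], Tn)
    let suf := sufc.1.reverse
    let res0 : List Int := [PySem.List.pyGetD suf 0 0]
    let rp := (PySem.List.pyRange 1 n 1).foldl (fun (rp : List Int × Int) l =>
        (rp.1 ++ [min (PySem.List.pyGetD suf l 0) rp.2 - PySem.List.pyGetD T l 0],
         min rp.2 (PySem.List.pyGetD T (n + l + 1) 0))) (res0, PySem.List.pyGetD T (n + 1) 0)
    rp.1

-- ===== PRECONDITION & SPEC =====
-- Pre_ excludes exactly the inputs with len(D) < len(P), on which A raises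
-- (IndexError in the in-place prefix loop, or ValueError from min([])).
def Pre_min_delt (P : List Int) (D : List Int) : Prop := P.length ≤ D.length
instance (P : List Int) (D : List Int) : Decidable (Pre_min_delt P D) := by unfold Pre_min_delt; infer_instance
def pvWitness_min_delt : List Int × List Int := ([1, 2, 3], [2, 1, 5])
def Spec_min_delt (P : List Int) (D : List Int) (out : List Int) : Prop := out = min_delt_alt P D
instance (P : List Int) (D : List Int) (out : List Int) : Decidable (Spec_min_delt P D out) := by unfold Spec_min_delt; infer_instance

-- ===== CLAIM (what is proved, stated in full; the proofs are below) =====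
def Claim_equal_min_delt : Prop := ∀ (P : List Int) (D : List Int), Dom_min_delt P D → Pre_min_delt P D → Spec_min_delt P D (min_delt P D)

-- ===== LEMMAS AND PROOFS =====

-- prefix sums with a running accumulator: pscan a [x1, x2, …] = [a+x1, a+x1+x2, …]
def pscan : Int → List Int → List Int
  | _, [] => []
  | a, x :: xs => (a + x) :: pscan (a + x) xs

-- min of a nonempty list as Python computes it (value of min(xs)); 0 on []
def vmin : List Int → Int
  | [] => 0
  | h :: t => t.foldl min h

theorem pscan_length (a : Int) (xs : List Int) : (pscan a xs).length = xs.length := by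
  induction xs generalizing a with
  | nil => rfl
  | cons x xs ih => simp [pscan, ih]

theorem pscan_append (a : Int) (xs ys : List Int) :
    pscan a (xs ++ ys) = pscan a xs ++ pscan (a + xs.sum) ys := by
  induction xs generalizing a with
  | nil => simp [pscan]
  | cons x xs ih => simp [pscan, ih, add_assoc]

theorem pscan_shift (a b : Int) (xs : List Int) :
    pscan a xs = (pscan b xs).map (· + (a - b)) := by
  induction xs generalizing a b with
  | nil => simp [pscan]
  | cons x xs ih =>
    simp only [pscan, List.map_cons]
    rw [ih (a + x) (b + x)]
    simp only [add_sub_add_right_eq_sub]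
    congr 1
    ring

theorem pscan_getD (a : Int) (xs : List Int) (k : Nat) (h : k < xs.length) :
    (pscan a xs).getD k 0 = a + (xs.take (k + 1)).sum := by
  induction xs generalizing a k with
  | nil => simp at h
  | cons x xs ih =>
    cases k with
    | zero => simp [pscan]
    | succ k =>
      simp only [pscan, List.getD_cons_succ, List.take_succ_cons, List.sum_cons]
      rw [ih (a + x) k (by simpa using h)]; ring

theorem foldl_min_seed (xs : List Int) (a c : Int) :
    xs.foldl min (min a c) = min a (xs.foldl min c) := by
  induction xs generalizing c with
  | nil => rfl
  | cons x xs ih => simp only [List.foldl_cons, min_assoc, ih]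

theorem foldl_min_map_add (xs : List Int) (c a : Int) :
    (xs.map (· + c)).foldl min (a + c) = xs.foldl min a + c := by
  induction xs generalizing a with
  | nil => rfl
  | cons x xs ih =>
    simp only [List.map_cons, List.foldl_cons]
    rw [min_add_add_right, ih]

theorem vmin_map_add (xs : List Int) (c : Int) (h : xs ≠ []) :
    vmin (xs.map (· + c)) = vmin xs + c := by
  cases xs with
  | nil => exact absurd rfl h
  | cons x t => simp only [List.map_cons, vmin]; exact foldl_min_map_add t c x

theorem foldl_min_of_ne_nil (ys : List Int) (s : Int) (h : ys ≠ []) :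
    ys.foldl min s = min s (vmin ys) := by
  cases ys with
  | nil => exact absurd rfl h
  | cons y t =>
    simp only [List.foldl_cons, vmin]
    rw [foldl_min_seed t s y]

theorem vmin_append (xs ys : List Int) (hx : xs ≠ []) (hy : ys ≠ []) :
    vmin (xs ++ ys) = min (vmin xs) (vmin ys) := by
  cases xs with
  | nil => exact absurd rfl hx
  | cons x t =>
    simp only [List.cons_append, vmin, List.foldl_append]
    exact foldl_min_of_ne_nil ys (t.foldl min x) hy

theorem vmin_snoc (zs : List Int) (e : Int) : vmin (zs ++ [e]) = zs.foldl min e := by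
  cases zs with
  | nil => simp [vmin]
  | cons z t =>
    simp only [List.cons_append, vmin, List.foldl_append, List.foldl_cons, List.foldl_nil]
    rw [show min e z = min z e from min_comm e z, foldl_min_seed t z e]
    rcases List.eq_nil_or_concat t with h | _
    · subst h; simp
    · rw [foldl_min_of_ne_nil t z (by rename_i h; rcases h with ⟨_, _, rfl⟩; simp),
          foldl_min_of_ne_nil t e (by rename_i h; rcases h with ⟨_, _, rfl⟩; simp)]
      omega

theorem min?_getD_vmin (xs : List Int) (h : xs ≠ []) :
    (PySem.List.min? xs (fun x => x)).getD 0 = vmin xs := by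
  cases xs with
  | nil => exact absurd rfl h
  | cons x t => rw [PySem.List.min?_id_cons]; rfl


theorem pscan_sub (A B : List Int) (a b : Int) (h : A.length = B.length) :
    List.zipWith (· - ·) (pscan a A) (pscan b B) = pscan (a - b) (List.zipWith (· - ·) A B) := by
  induction A generalizing B a b with
  | nil => cases B with
    | nil => rfl
    | cons y ys => simp at h
  | cons x xs ih =>
    cases B with
    | nil => simp at h
    | cons y ys =>
      simp only [pscan, List.zipWith_cons_cons]
      rw [ih ys (a + x) (b + y) (by simpa using h)]
      congr 1
      · ring
      · congr 1; ring

theorem inner_fold_gen (xs : List Int) (m : Nat) (h : m ≤ xs.length) :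
    (PySem.List.pyRange 1 (m : Int) 1).foldl
      (fun s i => PySem.List.pySetD s i (PySem.List.pyGetD s i 0 + PySem.List.pyGetD s (i-1) 0)) xs
    = pscan 0 (xs.take m) ++ xs.drop m := by
  induction m with
  | zero => simp [PySem.List.pyRange_one_eq_nil, pscan]
  | succ m ih =>
    have hm : m < xs.length := h
    have hlenpre : (pscan 0 (xs.take m)).length = m := by
      rw [pscan_length]; simpa using Nat.le_of_lt hm
    cases Nat.eq_zero_or_pos m with
    | inl h0 =>
      subst h0
      rw [show ((1:Nat) : Int) = 1 by norm_cast, PySem.List.pyRange_one_eq_nil (by norm_num)]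
      cases xs with
      | nil => simp at hm
      | cons x t => simp [pscan]
    | inr hpos =>
      rw [show ((m + 1 : Nat) : Int) = (m : Int) + 1 by push_cast; ring,
          PySem.List.pyRange_one_succ_right (by exact_mod_cast hpos), List.foldl_append,
          ih (Nat.le_of_lt hm)]
      simp only [List.foldl_cons, List.foldl_nil]
      rw [PySem.List.pySetD_natCast, show ((m : Int) - 1) = ((m - 1 : Nat) : Int) by
            push_cast [Nat.cast_sub hpos]; ring,
          PySem.List.pyGetD_natCast, PySem.List.pyGetD_natCast]
      have hdrop : xs.drop m = xs[m] :: xs.drop (m + 1) := List.drop_eq_getElem_cons hm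
      have hget1 : (pscan 0 (xs.take m) ++ xs.drop m).getD m 0 = xs[m] := by
        rw [List.getD_append_right _ _ _ _ (by omega), hlenpre, Nat.sub_self, hdrop]
        rfl
      have hget2 : (pscan 0 (xs.take m) ++ xs.drop m).getD (m - 1) 0 = (xs.take m).sum := by
        rw [List.getD_append _ _ _ _ (by omega)]
        rw [pscan_getD 0 (xs.take m) (m - 1) (by simp; omega)]
        rw [Nat.sub_add_cancel hpos]
        simp [List.take_take]
      rw [hget1, hget2]
      have hset : (pscan 0 (xs.take m) ++ xs.drop m).set m (xs[m] + (xs.take m).sum)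
           = pscan 0 (xs.take m) ++ (xs[m] + (xs.take m).sum) :: xs.drop (m + 1) := by
        rw [List.set_append_right _ _ (by omega), hlenpre, Nat.sub_self, hdrop]
        rfl
      rw [hset]
      conv_rhs => rw [List.take_succ_eq_append_getElem hm, pscan_append]
      simp [pscan]
      omega

theorem inner_fold (xs : List Int) (m : Nat) (h : xs.length = m) :
    (PySem.List.pyRange 1 (m : Int) 1).foldl
      (fun s i => PySem.List.pySetD s i (PySem.List.pyGetD s i 0 + PySem.List.pyGetD s (i-1) 0)) xs
    = pscan 0 xs := by
  have := inner_fold_gen xs m (by omega)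
  simpa [← h] using this

theorem pyRepeat_two (xs : List Int) : PySem.List.pyRepeat xs 2 = xs ++ xs := by
  simp [PySem.List.pyRepeat]

theorem A_char (P D : List Int) (h : P.length ≤ D.length) :
    min_delt P D = (List.range P.length).map
      (fun k => vmin (pscan 0 (((List.zipWith (· - ·) (P ++ P) (D ++ D)).drop k).take P.length))) := by
  simp only [min_delt]
  rw [PySem.List.pyRange_zero_nat, List.foldl_map, PySem.List.foldl_append_singleton_eq_map,
      List.nil_append]
  apply List.map_congr_left
  intro k hk
  rw [List.mem_range] at hk
  rw [pyRepeat_two, pyRepeat_two,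
      PySem.List.slice_natCast_add (P ++ P) k P.length,
      PySem.List.slice_natCast_add (D ++ D) k P.length,
      PySem.List.foldl_prod_mk
        (fun s i => PySem.List.pySetD s i (PySem.List.pyGetD s i 0 + PySem.List.pyGetD s (i-1) 0))
        (fun s i => PySem.List.pySetD s i (PySem.List.pyGetD s i 0 + PySem.List.pyGetD s (i-1) 0))
        (PySem.List.pyRange 1 (P.length : Int) 1) _ _]
  rw [inner_fold (List.take P.length (List.drop k (P ++ P))) P.length (by simp; omega),
      inner_fold (List.take P.length (List.drop k (D ++ D))) P.length (by simp; omega)]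
  rw [List.zip, List.map_zipWith]
  rw [pscan_sub _ _ 0 0 (by simp; omega)]
  rw [← List.take_zipWith, ← List.drop_zipWith]
  rw [min?_getD_vmin _ (by
    apply List.ne_nil_of_length_pos
    rw [pscan_length]
    simp
    omega)]
  norm_num

-- ===== B-side lemmas =====

-- running minimum of the S-window i..j seeded with c
def wm (S : List Int) (i j : Nat) (c : Int) : Int := ((S.drop i).take (j + 1 - i)).foldl min c

theorem sloop (e : List (Int × Int)) (acc : List Int) (c : Int) :
    e.foldl (fun (sc : List Int × Int) pd => (sc.1 ++ [sc.2 + pd.1 - pd.2], sc.2 + pd.1 - pd.2)) (acc, c)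
    = (acc ++ pscan c (e.map (fun pd => pd.1 - pd.2)), c + (e.map (fun pd => pd.1 - pd.2)).sum) := by
  induction e generalizing acc c with
  | nil => simp [pscan]
  | cons x e ih =>
    simp only [List.foldl_cons, List.map_cons, pscan, List.sum_cons, ih, Prod.mk.injEq]
    constructor
    · rw [show c + x.1 - x.2 = c + (x.1 - x.2) by ring]
      simp [List.append_assoc]
    · ring

theorem pyRange_neg_cons (j : Nat) :
    PySem.List.pyRange ((j : Int) + 1) 0 (-1) = ((j : Int) + 1) :: PySem.List.pyRange (j : Int) 0 (-1) := by
  rw [PySem.List.pyRange_neg_one, PySem.List.pyRange_neg_one]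
  rw [show (((j : Int) + 1) - 0).toNat = j + 1 by omega, show ((j : Int) - 0).toNat = j by omega]
  rw [List.range_succ_eq_map, List.map_cons, List.map_map]
  congr 1
  apply List.map_congr_left
  intro t _
  simp only [Function.comp_apply]
  push_cast; ring

theorem getD_eq_getElem' (S : List Int) (k : Nat) (h : k < S.length) : S.getD k 0 = S[k] :=
  List.getD_eq_getElem S 0 h

theorem wm_extend (S : List Int) (i j : Nat) (c : Int) (hij : i ≤ j + 1) (hj : j + 1 < S.length) :
    wm S i (j + 1) c = min (wm S i j c) (S.getD (j + 1) 0) := by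
  unfold wm
  have hlt : j + 1 - i < (S.drop i).length := by simp; omega
  rw [show j + 1 + 1 - i = (j + 1 - i) + 1 by omega,
      List.take_succ_eq_append_getElem hlt, List.foldl_append]
  simp only [List.foldl_cons, List.foldl_nil]
  rw [List.getElem_drop, getD_eq_getElem' S (j + 1) hj]
  congr 2
  omega

theorem wm_seed (S : List Int) (i j : Nat) (a c : Int) :
    wm S i j (min a c) = min a (wm S i j c) := foldl_min_seed _ a c

theorem sufloop (S : List Int) (j : Nat) (hj : j < S.length) (acc : List Int) (c : Int) :
    (PySem.List.pyRange (j : Int) 0 (-1)).foldl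
      (fun (sc : List Int × Int) i => (sc.1 ++ [min (PySem.List.pyGetD S i 0) sc.2], min (PySem.List.pyGetD S i 0) sc.2)) (acc, c)
    = (acc ++ (List.range j).map (fun t => wm S (j - t) j c), wm S 1 j c) := by
  induction j generalizing acc c with
  | zero =>
    rw [show ((0 : Nat) : Int) = 0 by norm_cast, PySem.List.pyRange_neg_one]
    simp [wm]
  | succ j ih =>
    have hj' : j < S.length := by omega
    rw [show ((j + 1 : Nat) : Int) = (j : Int) + 1 by push_cast; ring, pyRange_neg_cons j,
        List.foldl_cons]
    rw [show ((j : Int) + 1) = ((j + 1 : Nat) : Int) by push_cast; ring,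
        PySem.List.pyGetD_natCast]
    rw [ih hj']
    simp only [Prod.mk.injEq]
    have key : ∀ i : Nat, i ≤ j + 1 →
        wm S i j (min (S.getD (j + 1) 0) c) = wm S i (j + 1) c := by
      intro i hi
      rw [wm_seed, min_comm, ← wm_extend S i j c hi hj]
    constructor
    · rw [List.range_succ_eq_map, List.map_cons, List.map_map, List.append_assoc]
      congr 1
      rw [List.singleton_append]
      congr 1
      · rw [Nat.sub_zero, ← key (j + 1) (Nat.le_refl _)]
        unfold wm
        simp
      · apply List.map_congr_left
        intro t ht
        rw [List.mem_range] at ht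
        simp only [Function.comp_apply]
        rw [show j + 1 - (t + 1) = j - t by omega, key (j - t) (by omega)]
    · exact key 1 (by omega)

theorem S_getD (d : List Int) (l : Nat) (h : l ≤ d.length) :
    (0 :: pscan 0 d).getD l 0 = (d.take l).sum := by
  cases l with
  | zero => simp
  | succ l =>
    rw [List.getD_cons_succ, pscan_getD 0 d l (by omega)]
    ring

theorem vmin_take_succ (V : List Int) (m : Nat) (h1 : 1 ≤ m) (hm : m < V.length) :
    vmin (V.take (m + 1)) = min (vmin (V.take m)) (V.getD m 0) := by
  rw [List.take_succ_eq_append_getElem hm, vmin_snoc,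
      foldl_min_of_ne_nil _ _ (by
        apply List.ne_nil_of_length_pos
        simp
        omega),
      getD_eq_getElem' V m hm, min_comm]

theorem resloop (suf T : List Int) (n : Nat) (hT : T.length = 2 * n + 1) (hn : 1 ≤ n)
    (res0 : List Int) (m : Nat) (hm1 : 1 ≤ m) (hm : m ≤ n) :
    (PySem.List.pyRange 1 (m : Int) 1).foldl
      (fun (rp : List Int × Int) l =>
        (rp.1 ++ [min (PySem.List.pyGetD suf l 0) rp.2 - PySem.List.pyGetD T l 0],
         min rp.2 (PySem.List.pyGetD T ((n : Int) + l + 1) 0))) (res0, PySem.List.pyGetD T ((n : Int) + 1) 0)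
    = (res0 ++ (List.range (m - 1)).map (fun t =>
         min (suf.getD (t + 1) 0) (vmin ((T.drop (n + 1)).take (t + 1))) - T.getD (t + 1) 0),
       vmin ((T.drop (n + 1)).take m)) := by
  have hfirst : PySem.List.pyGetD T ((n : Int) + 1) 0 = vmin ((T.drop (n + 1)).take 1) := by
    have h1 : n + 1 < T.length := by omega
    have hd : (T.drop (n + 1)).take 1 = [T[n + 1]] := by
      rw [List.take_one]
      simp [List.head?_drop, List.getElem?_eq_getElem h1]
    rw [hd, show ((n : Int) + 1) = ((n + 1 : Nat) : Int) by push_cast; ring,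
        PySem.List.pyGetD_natCast, getD_eq_getElem' T (n + 1) h1]
    rfl
  induction m with
  | zero => omega
  | succ m ih =>
    cases Nat.eq_zero_or_pos m with
    | inl h0 =>
      subst h0
      rw [show ((1 : Nat) : Int) = 1 by norm_cast, PySem.List.pyRange_one_eq_nil (by norm_num)]
      simp only [List.foldl_nil, List.range_zero, List.map_nil, List.append_nil, Prod.mk.injEq,
        Nat.sub_self]
      exact ⟨trivial, hfirst⟩
    | inr hpos =>
      have hmn : m ≤ n := by omega
      rw [show ((m + 1 : Nat) : Int) = (m : Int) + 1 by push_cast; ring,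
          PySem.List.pyRange_one_succ_right (by exact_mod_cast hpos), List.foldl_append,
          ih hpos hmn]
      simp only [List.foldl_cons, List.foldl_nil]
      rw [PySem.List.pyGetD_natCast, PySem.List.pyGetD_natCast,
          show ((n : Int) + (m : Int) + 1) = ((n + m + 1 : Nat) : Int) by push_cast; ring,
          PySem.List.pyGetD_natCast]
      simp only [Prod.mk.injEq]
      constructor
      · rw [show m + 1 - 1 = (m - 1) + 1 by omega, List.range_succ, List.map_append]
        simp only [List.map_cons, List.map_nil]
        rw [← List.append_assoc, show m - 1 + 1 = m by omega]
      · have hVd : T.getD (n + m + 1) 0 = (T.drop (n + 1)).getD m 0 := by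
          rw [getD_eq_getElem' T (n + m + 1) (by omega),
              getD_eq_getElem' (T.drop (n + 1)) m (by simp; omega), List.getElem_drop]
          congr 1
          omega
        rw [hVd, vmin_take_succ (T.drop (n + 1)) m hpos (by simp; omega)]

theorem wm_full (T : List Int) (n : Nat) (hT : n < T.length) (i : Nat) (h1 : 1 ≤ i) (hi : i ≤ n) :
    wm T i (n - 1) (T.getD n 0) = vmin ((T.drop i).take (n + 1 - i)) := by
  have hlt : n - i < (T.drop i).length := by simp; omega
  have hsplit : (T.drop i).take (n + 1 - i)
      = (T.drop i).take (n - i) ++ [(T.drop i)[n - i]'hlt] := by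
    rw [← List.take_succ_eq_append_getElem hlt]
    congr 1
    omega
  have hlast : (T.drop i)[n - i]'hlt = T[n]'hT := by
    rw [List.getElem_drop]
    congr 1
    omega
  rw [hsplit, hlast, vmin_snoc]
  unfold wm
  rw [show n - 1 + 1 - i = n - i by omega, getD_eq_getElem' T n hT]

theorem suf_getD (T : List Int) (n : Nat) (hT : n < T.length) (hn : 1 ≤ n)
    (l : Nat) (hl : l < n) :
    (([T.getD n 0] ++ (List.range (n - 1)).map
        (fun t => wm T (n - 1 - t) (n - 1) (T.getD n 0))).reverse).getD l 0
    = vmin ((T.drop (l + 1)).take (n - l)) := by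
  have hL : ([T.getD n 0] ++ (List.range (n - 1)).map
      (fun t => wm T (n - 1 - t) (n - 1) (T.getD n 0))).length = n := by
    simp
    omega
  rw [List.getD_eq_getElem?_getD, List.getElem?_reverse (by rw [hL]; omega), hL]
  by_cases hcase : l = n - 1
  · subst hcase
    rw [show n - 1 - (n - 1) = 0 by omega, List.singleton_append, List.getElem?_cons_zero]
    have hdrop : (T.drop (n - 1 + 1)).take (n - (n - 1)) = [T[n]'hT] := by
      rw [show n - 1 + 1 = n by omega, show n - (n - 1) = 1 by omega, List.take_one]
      simp [List.head?_drop, List.getElem?_eq_getElem hT]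
    rw [hdrop, getD_eq_getElem' T n hT]
    rfl
  · have hll : l < n - 1 := by omega
    rw [show n - 1 - l = (n - 2 - l) + 1 by omega, List.singleton_append,
        List.getElem?_cons_succ, List.getElem?_map, List.getElem?_range (by omega)]
    simp only [Option.map_some, Option.getD_some]
    rw [show n - 1 - (n - 2 - l) = l + 1 by omega]
    rw [wm_full T n hT (l + 1) (by omega) (by omega)]
    congr 2
    omega

theorem pscan_take (a : Int) (xs : List Int) (k : Nat) :
    pscan a (xs.take k) = (pscan a xs).take k := by
  induction xs generalizing a k with
  | nil => simp [pscan]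
  | cons x xs ih =>
    cases k with
    | zero => simp [pscan]
    | succ k => simp [pscan, ih]

theorem per_index (E : List Int) (n : Nat) (hE : E.length = 2 * n) (l : Nat)
    (h1 : 1 ≤ l) (hl : l < n) :
    vmin (pscan 0 ((E.drop l).take n))
    = min (vmin (((pscan 0 E).drop l).take (n - l))) (vmin (((pscan 0 E).drop n).take l))
      - (E.take l).sum := by
  have hVsplit : pscan 0 E = pscan 0 (E.take l) ++ pscan ((E.take l).sum) (E.drop l) := by
    conv_lhs => rw [← List.take_append_drop l E]
    rw [pscan_append, zero_add]
  have hlen1 : (pscan 0 (E.take l)).length = l := by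
    rw [pscan_length]
    simp
    omega
  have hdropV : (pscan 0 E).drop l = pscan ((E.take l).sum) (E.drop l) := by
    rw [hVsplit, List.drop_left' hlen1]
  have hstep : pscan 0 ((E.drop l).take n)
      = (((pscan 0 E).drop l).take n).map (· + (0 - (E.take l).sum)) := by
    rw [pscan_take, pscan_shift 0 ((E.take l).sum) (E.drop l), ← hdropV, List.map_take]
  have hsplit2 : ((pscan 0 E).drop l).take n
      = ((pscan 0 E).drop l).take (n - l) ++ ((pscan 0 E).drop n).take l := by
    conv_lhs => rw [show n = (n - l) + l by omega, List.take_add]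
    rw [List.drop_drop, show l + (n - l) = n by omega]
  have hlenV : (pscan 0 E).length = 2 * n := by rw [pscan_length, hE]
  have hne1 : ((pscan 0 E).drop l).take (n - l) ≠ [] := by
    apply List.ne_nil_of_length_pos
    simp [hlenV]
    omega
  have hne2 : ((pscan 0 E).drop n).take l ≠ [] := by
    apply List.ne_nil_of_length_pos
    simp [hlenV]
    omega
  rw [hstep, hsplit2, List.map_append,
      vmin_append _ _ (by simpa using hne1) (by simpa using hne2),
      vmin_map_add _ _ hne1, vmin_map_add _ _ hne2]
  omega

theorem B_char (P D : List Int) (h : P.length ≤ D.length) (hP : P ≠ []) :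
    min_delt_alt P D = (List.range P.length).map
      (fun k => vmin (pscan 0 (((List.zipWith (· - ·) (P ++ P) (D ++ D)).drop k).take P.length))) := by
  have hn : 1 ≤ P.length := List.length_pos_of_ne_nil hP
  have hElen : (List.zipWith (· - ·) (P ++ P) (D ++ D)).length = 2 * P.length := by
    simp
    omega
  simp only [min_delt_alt]
  rw [if_neg (by exact_mod_cast Nat.pos_iff_ne_zero.mp hn)]
  rw [sloop]
  simp only []
  rw [show ((P ++ P).zip (D ++ D)).map (fun pd => pd.1 - pd.2)
        = List.zipWith (· - ·) (P ++ P) (D ++ D) by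
      rw [List.zip, List.map_zipWith], List.singleton_append]
  rw [PySem.List.pyGetD_natCast]
  have hTlen : (0 :: pscan 0 (List.zipWith (· - ·) (P ++ P) (D ++ D))).length
      = 2 * P.length + 1 := by
    simp [pscan_length, hElen]
  rw [show ((P.length : Int) - 1) = ((P.length - 1 : Nat) : Int) by
        push_cast [Nat.cast_sub hn]; ring]
  rw [sufloop (0 :: pscan 0 (List.zipWith (· - ·) (P ++ P) (D ++ D))) (P.length - 1) (by omega)]
  simp only []
  rw [resloop (([List.getD (0 :: pscan 0 (List.zipWith (· - ·) (P ++ P) (D ++ D))) P.length 0] ++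
        (List.range (P.length - 1)).map
          (fun t => wm (0 :: pscan 0 (List.zipWith (· - ·) (P ++ P) (D ++ D))) (P.length - 1 - t)
            (P.length - 1)
            (List.getD (0 :: pscan 0 (List.zipWith (· - ·) (P ++ P) (D ++ D))) P.length 0))).reverse)
      (0 :: pscan 0 (List.zipWith (· - ·) (P ++ P) (D ++ D)))
      P.length hTlen hn _ P.length hn (Nat.le_refl _)]
  simp only [List.drop_succ_cons]
  conv_rhs => rw [show P.length = (P.length - 1) + 1 by omega, List.range_succ_eq_map]
  rw [List.map_cons, List.map_map]
  have hsufl : ∀ l : Nat, l < P.length →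
      (([List.getD (0 :: pscan 0 (List.zipWith (· - ·) (P ++ P) (D ++ D))) P.length 0] ++
        (List.range (P.length - 1)).map
          (fun t => wm (0 :: pscan 0 (List.zipWith (· - ·) (P ++ P) (D ++ D))) (P.length - 1 - t)
            (P.length - 1)
            (List.getD (0 :: pscan 0 (List.zipWith (· - ·) (P ++ P) (D ++ D))) P.length 0))).reverse).getD l 0
      = vmin (((pscan 0 (List.zipWith (· - ·) (P ++ P) (D ++ D))).drop l).take (P.length - l)) := by
    intro l hl
    rw [suf_getD _ P.length (by omega) hn l hl]
    rfl
  rw [show PySem.List.pyGetD (([List.getD (0 :: pscan 0 (List.zipWith (· - ·) (P ++ P) (D ++ D))) P.length 0] ++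
        (List.range (P.length - 1)).map
          (fun t => wm (0 :: pscan 0 (List.zipWith (· - ·) (P ++ P) (D ++ D))) (P.length - 1 - t)
            (P.length - 1)
            (List.getD (0 :: pscan 0 (List.zipWith (· - ·) (P ++ P) (D ++ D))) P.length 0))).reverse) 0 0
      = vmin ((pscan 0 (List.zipWith (· - ·) (P ++ P) (D ++ D))).take P.length) by
        rw [PySem.List.pyGetD_zero, hsufl 0 hn]
        simp]
  rw [List.singleton_append]
  congr 1
  · rw [List.drop_zero, ← pscan_take, show P.length - 1 + 1 = P.length by omega]
  · apply List.map_congr_left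
    intro t ht
    rw [List.mem_range] at ht
    simp only [Function.comp_apply, Nat.succ_eq_add_one]
    rw [show P.length - 1 + 1 = P.length by omega]
    rw [per_index _ P.length hElen (t + 1) (by omega) (by omega)]
    rw [hsufl (t + 1) (by omega), S_getD _ _ (by omega)]

-- ===== VERDICT (by name: the statement is the Claim_ definition above) =====
theorem min_delt_spec : Claim_equal_min_delt := by
  intro P D _ hpre
  unfold Spec_min_delt
  by_cases hP : P = []
  · subst hP
    rfl
  · rw [A_char P D hpre, B_char P D hpre hP]
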